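-- pv_equiv track=rewrite | github.com/erwandemerville/nsi | premiere/gloutons/src/voyageur_commerce_bf.py | voyageur_brute
-- ===== SOURCE A (Python) =====
-- from itertools import permutations
--
-- def calculer_distance(trajet, distances):
--     ''' Calculer et renvoyer la distance d'un trajet. '''
--     distance_totale = 0
--     for i in range(len(trajet) - 1):
--         distance_totale += distances[trajet[i]][trajet[i + 1]]
--     # Ajouter la distance pour revenir à la ville de départ
--     distance_totale += distances[trajet[-1]][trajet[0]]
--     return distance_totale
--
-- def voyageur_brute(villes, distances, ville_depart):
--     ''' Algorithme de force brute pour déterminer le ou les meilleurs trajets possibles. '''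
--     # Créer une liste des indices des villes (0, 1, 2, ...)
--     indices_villes = list(range(len(villes)))
--
--     # Retirer l'indice correspondant à la ville de départ
--     ville_depart_index = villes.index(ville_depart)
--     indices_villes.remove(ville_depart_index)
--
--     # Générer toutes les permutations possibles des indices des villes restantes
--     permutations_villes = permutations(indices_villes)
--
--     # Initialiser liste des résultats et distance min
--     res = []
--     dmin = float('inf')
--
--     for permutation in permutations_villes:
--         # Ajouter l'indice de la ville de départ au début de la permutation
--         trajet = [ville_depart_index] + list(permutation)
--         # Calculer la distance totale du trajet
--         distance_totale = calculer_distance(trajet, distances)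
--         # Convertir les indices des villes en noms de villes
--         trajet_villes = [villes[i] for i in trajet] + [ville_depart]
--         # Ajouter ou non à la liste des résultats
--         if distance_totale < dmin:
--             dmin = distance_totale
--             res = []
--             res.append((distance_totale, trajet_villes))
--         elif distance_totale == dmin:
--             res.append((distance_totale, trajet_villes))
--
--     return res
-- ===== SOURCE B (Python) =====
-- from itertools import permutations
--
-- def calculer_distance(trajet, distances):
--     ''' Calculer et renvoyer la distance d'un trajet. '''
--     distance_totale = 0
--     for i in range(len(trajet) - 1):
--         distance_totale += distances[trajet[i]][trajet[i + 1]]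
--     distance_totale += distances[trajet[-1]][trajet[0]]
--     return distance_totale
--
-- def voyageur_brute(villes, distances, ville_depart):
--     ''' Force brute : materialiser tous les (distance, trajet) puis filtrer par le minimum. '''
--     ville_depart_index = villes.index(ville_depart)
--     indices_villes = list(range(len(villes)))
--     indices_villes.remove(ville_depart_index)
--     pairs = []
--     for permutation in permutations(indices_villes):
--         trajet = [ville_depart_index] + list(permutation)
--         pairs.append((calculer_distance(trajet, distances),
--                       [villes[i] for i in trajet] + [ville_depart]))
--     dmin = min(d for d, _ in pairs)
--     return [p for p in pairs if p[0] == dmin]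
-- ===== Notes on version B (the rewrite author's own statement) =====
-- stated objective: simpler
-- what changed: A tracks the running minimum online, resetting its result list whenever a strictly shorter tour appears; B materialises the full (distance, tour) table in one pass, computes the minimum distance in a second pass, and filters the table in a third, keeping order and ties identically.
import Mathlib
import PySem

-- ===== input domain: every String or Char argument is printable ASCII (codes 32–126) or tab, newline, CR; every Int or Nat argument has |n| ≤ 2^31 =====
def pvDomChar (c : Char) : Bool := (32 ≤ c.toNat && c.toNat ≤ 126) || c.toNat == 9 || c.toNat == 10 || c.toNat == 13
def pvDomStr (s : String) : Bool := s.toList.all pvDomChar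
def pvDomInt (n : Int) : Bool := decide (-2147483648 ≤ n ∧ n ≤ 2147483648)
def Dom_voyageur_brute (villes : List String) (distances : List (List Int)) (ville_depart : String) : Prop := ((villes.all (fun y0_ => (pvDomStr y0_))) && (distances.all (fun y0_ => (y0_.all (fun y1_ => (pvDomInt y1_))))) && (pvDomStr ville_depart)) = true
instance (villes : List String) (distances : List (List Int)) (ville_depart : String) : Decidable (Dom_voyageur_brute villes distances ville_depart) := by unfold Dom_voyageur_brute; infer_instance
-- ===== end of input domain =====

-- B replaces A's online min-tracking loop (reset the result list on every new minimum) by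
-- materialise-all-pairs, then a separate min pass, then a filter pass; objective: simpler.

-- ===== PORT A =====

-- distances[i][j]; the .getD defaults are only reachable on inputs excluded by Pre_ (Python raises there)
def pvDist (distances : List (List Int)) (i j : Int) : Int :=
  (PySem.List.pyGet? ((PySem.List.pyGet? distances i).getD []) j).getD 0

-- literal port of calculer_distance (shared by both Pythons)
def calculer_distance (trajet : List Int) (distances : List (List Int)) : Int :=
  let dt := (List.range (trajet.length - 1)).foldl
    (fun acc i => acc + pvDist distances ((PySem.List.pyGet? trajet (i : Int)).getD 0)
                                         ((PySem.List.pyGet? trajet ((i : Int) + 1)).getD 0)) 0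
  dt + pvDist distances ((PySem.List.pyGet? trajet (-1)).getD 0) ((PySem.List.pyGet? trajet 0).getD 0)

-- all ways to pick one element (in list order) with the remaining list
def pvSelections {α : Type} : List α → List (α × List α)
  | [] => []
  | x :: xs => (x, xs) :: (pvSelections xs).map (fun p => (p.1, x :: p.2))

theorem pvSelections_len {α : Type} (l : List α) (p : α × List α) (hp : p ∈ pvSelections l) :
    p.2.length + 1 = l.length := by
  induction l generalizing p with
  | nil => simp [pvSelections] at hp
  | cons x xs ih =>
    simp only [pvSelections, List.mem_cons, List.mem_map] at hp
    rcases hp with h | ⟨q, hq, rfl⟩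
    · subst h; simp
    · have := ih q hq; simp at this ⊢; omega

-- itertools.permutations in generation order (shared by both Pythons)
def pvPerms {α : Type} (l : List α) : List (List α) :=
  if l = [] then [[]]
  else (pvSelections l).attach.flatMap (fun p => (pvPerms p.1.2).map (p.1.1 :: ·))
termination_by l.length
decreasing_by
  have := pvSelections_len l _ p.2; omega

-- A's running state: result list and current minimum (none = float('inf'))
def pvStep (st : List (Int × List String) × Option Int) (p : Int × List String) :
    List (Int × List String) × Option Int :=
  match st.2 with
  | none => ([p], some p.1)
  | some m => if p.1 < m then ([p], some p.1) else if p.1 = m then (st.1 ++ [p], st.2) else st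

def voyageur_brute (villes : List String) (distances : List (List Int)) (ville_depart : String) : List (Int × List String) :=
  let ville_depart_index : Int := ((PySem.List.index? villes ville_depart).getD 0 : Nat)
  let indices_villes : List Int := (List.range villes.length).map Int.ofNat
  let indices_villes := (PySem.List.remove? indices_villes ville_depart_index).getD indices_villes
  ((pvPerms indices_villes).foldl (fun st perm =>
      let trajet := ville_depart_index :: perm
      let distance_totale := calculer_distance trajet distances
      let trajet_villes := trajet.map (fun i => (PySem.List.pyGet? villes i).getD "") ++ [ville_depart]
      pvStep st (distance_totale, trajet_villes)) ([], none)).1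

-- ===== PORT B =====
def voyageur_brute_alt (villes : List String) (distances : List (List Int)) (ville_depart : String) : List (Int × List String) :=
  let ville_depart_index : Int := ((PySem.List.index? villes ville_depart).getD 0 : Nat)
  let indices_villes : List Int := (List.range villes.length).map Int.ofNat
  let indices_villes := (PySem.List.remove? indices_villes ville_depart_index).getD indices_villes
  let pairs := (pvPerms indices_villes).map (fun perm =>
      let trajet := ville_depart_index :: perm
      (calculer_distance trajet distances,
       trajet.map (fun i => (PySem.List.pyGet? villes i).getD "") ++ [ville_depart]))
  match PySem.List.min? (pairs.map Prod.fst) (fun y => y) with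
  | none => []
  | some dmin => pairs.filter (fun p => p.1 == dmin)

-- ===== PRECONDITION & SPEC =====
-- Pre_ = exactly the inputs on which the Python A returns: the start city occurs in villes
-- (else villes.index raises ValueError) and every one of the first |villes| distance rows
-- exists and has length ≥ |villes| (each such row/column is read by some tour; else IndexError).
def Pre_voyageur_brute (villes : List String) (distances : List (List Int)) (ville_depart : String) : Prop :=
  ville_depart ∈ villes ∧ villes.length ≤ distances.length ∧
    ∀ row ∈ distances.take villes.length, villes.length ≤ row.length
instance (villes : List String) (distances : List (List Int)) (ville_depart : String) : Decidable (Pre_voyageur_brute villes distances ville_depart) := by unfold Pre_voyageur_brute; infer_instance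

def pvWitness_voyageur_brute : List String × List (List Int) × String :=
  (["a", "b", "c"], ([[0, 1, 2], [1, 0, 3], [2, 3, 0]], "a"))

def Spec_voyageur_brute (villes : List String) (distances : List (List Int)) (ville_depart : String) (out : List (Int × List String)) : Prop := out = voyageur_brute_alt villes distances ville_depart
instance (villes : List String) (distances : List (List Int)) (ville_depart : String) (out : List (Int × List String)) : Decidable (Spec_voyageur_brute villes distances ville_depart out) := by unfold Spec_voyageur_brute; infer_instance

-- ===== CLAIM (what is proved, stated in full; the proofs are below) =====
def Claim_equal_voyageur_brute : Prop := ∀ (villes : List String) (distances : List (List Int)) (ville_depart : String), Dom_voyageur_brute villes distances ville_depart → Pre_voyageur_brute villes distances ville_depart → Spec_voyageur_brute villes distances ville_depart (voyageur_brute villes distances ville_depart)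

-- ===== LEMMAS AND PROOFS =====

theorem pv_foldl_min_le (l : List Int) (a : Int) : l.foldl min a ≤ a := by
  induction l generalizing a with
  | nil => simp
  | cons x xs ih =>
    simp only [List.foldl_cons]
    exact le_trans (ih (min a x)) (min_le_left a x)

-- invariant of A's loop once the minimum is finite
theorem pv_inv (rest : List (Int × List String)) (res : List (Int × List String)) (m : Int) :
    rest.foldl pvStep (res, some m) =
      (((if (rest.map Prod.fst).foldl min m = m then res else []) ++
        rest.filter (fun p => p.1 == (rest.map Prod.fst).foldl min m)),
       some ((rest.map Prod.fst).foldl min m)) := by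
  induction rest generalizing res m with
  | nil => simp
  | cons p rest ih =>
    simp only [List.foldl_cons, List.map_cons, List.filter_cons]
    rcases lt_trichotomy p.1 m with h | h | h
    · have hstep : pvStep (res, some m) p = ([p], some p.1) := by
        simp [pvStep, h]
      rw [hstep, ih]
      have hmin : min m p.1 = p.1 := by omega
      have hle : (rest.map Prod.fst).foldl min p.1 ≤ p.1 := pv_foldl_min_le _ _
      simp only [hmin]
      have hne : (rest.map Prod.fst).foldl min p.1 ≠ m := by omega
      simp only [hne, if_false, List.nil_append]
      by_cases he : (rest.map Prod.fst).foldl min p.1 = p.1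
      · simp [he]
      · have : (p.1 == (rest.map Prod.fst).foldl min p.1) = false := by
          simp; omega
        simp [he, this]
    · have hstep : pvStep (res, some m) p = (res ++ [p], some m) := by
        simp [pvStep, h]
      rw [hstep, ih]
      have hmin : min m p.1 = m := by omega
      simp only [hmin]
      have hle : (rest.map Prod.fst).foldl min m ≤ m := pv_foldl_min_le _ _
      by_cases he : (rest.map Prod.fst).foldl min m = m
      · simp [he, h, List.append_assoc]
      · have : (p.1 == (rest.map Prod.fst).foldl min m) = false := by
          simp; omega
        simp [he, this]
    · have hstep : pvStep (res, some m) p = (res, some m) := by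
        have h1 : ¬ p.1 < m := by omega
        have h2 : ¬ p.1 = m := by omega
        simp [pvStep, h1, h2]
      rw [hstep, ih]
      have hmin : min m p.1 = m := by omega
      simp only [hmin]
      have hle : (rest.map Prod.fst).foldl min m ≤ m := pv_foldl_min_le _ _
      have : (p.1 == (rest.map Prod.fst).foldl min m) = false := by
        simp; omega
      simp [this]

-- A's online loop equals materialise-then-filter, over any pair list (fused-fold form below)
theorem pv_key (ps : List (Int × List String)) :
    (ps.foldl pvStep ([], none)).1 =
      match PySem.List.min? (ps.map Prod.fst) (fun y => y) with
      | none => []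
      | some dmin => ps.filter (fun p => p.1 == dmin) := by
  cases ps with
  | nil => simp [PySem.List.min?]
  | cons p rest =>
    simp only [List.map_cons, PySem.List.min?_id_cons, List.foldl_cons]
    have hstep : pvStep ([], none) p = ([p], some p.1) := by simp [pvStep]
    rw [hstep, pv_inv]
    have hle : (rest.map Prod.fst).foldl min p.1 ≤ p.1 := pv_foldl_min_le _ _
    simp only [List.filter_cons]
    by_cases he : (rest.map Prod.fst).foldl min p.1 = p.1
    · simp [he]
    · have : (p.1 == (rest.map Prod.fst).foldl min p.1) = false := by
        simp; omega
      simp [he, this]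

-- pv_key with the per-permutation pair construction fused into the fold (A's loop shape)
theorem pv_key2 (f : List Int → Int × List String) (l : List (List Int)) :
    (l.foldl (fun st perm => pvStep st (f perm)) ([], none)).1 =
      match PySem.List.min? ((l.map f).map Prod.fst) (fun y => y) with
      | none => []
      | some dmin => (l.map f).filter (fun p => p.1 == dmin) := by
  have h := pv_key (l.map f)
  rw [List.foldl_map] at h
  exact h

-- ===== VERDICT (by name: the statement is the Claim_ definition above) =====
theorem voyageur_brute_spec : Claim_equal_voyageur_brute := by
  intro villes distances ville_depart _ _
  unfold Spec_voyageur_brute voyageur_brute voyageur_brute_alt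
  exact pv_key2 _ _
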